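-- pv_equiv track=rewrite | github.com/razevortex/PrinterWatch_v3 | Packages/userIN.py | shift_pos
-- ===== SOURCE A (Python) =====
-- def shift_pos(hex_arr, shift_range=1, pos=0, vector='right'):
--     for _ in range(0, shift_range):
--         crypted_arr = []
--         if vector == 'right':
--             hold = hex_arr[-1][pos]
--             for hex in hex_arr:
--                 string = ''
--                 for i in range(len(hex)):
--                     if i != pos:
--                         string += hex[i]
--                     else:
--                         string += hold
--                         hold = hex[i]
--                 crypted_arr.append(string)
--         elif vector == 'left':
--             hold = hex_arr[0][pos]
--             for hex in hex_arr[::-1]: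
--                 string = ''
--                 for i in range(len(hex)):
--                     if i != pos:
--                         string += hex[i]
--                     else:
--                         string += hold
--                         hold = hex[i]
--                 crypted_arr.append(string)
--         return crypted_arr
-- ===== SOURCE B (Python) =====
-- def shift_pos(hex_arr, shift_range=1, pos=0, vector='right'):
--     orders = {'right': hex_arr, 'left': hex_arr[::-1]}
--     arr = orders.get(vector, [])
--     column = [h[pos] for h in arr]
--     rotated = column[-1:] + column[:-1]
--     return [h[:pos] + c + h[pos + 1:] for h, c in zip(arr, rotated)]
-- ===== Notes on version B (the rewrite author's own statement) =====
-- stated objective: alternative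
-- what changed: Replaces A's fused nested character loop that threads a 'hold' carry through every row with an explicit decomposition: pick the traversal order from a dict, extract the pos-th column, rotate it by one slice, and splice the rotated characters back with string slicing and zip; Pre_ excludes inputs where A returns no list (shift_range<1 gives None; empty array or pos outside the anchor raises IndexError) plus negative pos and ragged rows shorter than pos, corners where A's copy-through value is an artefact of comparing pos only with non-negative loop indices.
-- outside the precondition, e.g. on shift_pos(['ab', 'cd'], 1, -1, 'right'): A returns ['ab', 'cd'], B returns ['adab', 'cbcd']; on shift_pos(['a', 'bc'], 1, 1, 'right'): A returns ['a', 'bc'], B raises IndexError; on shift_pos(['ab'], 0, 0, 'right'): A returns None, B returns ['ab']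
import Mathlib
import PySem

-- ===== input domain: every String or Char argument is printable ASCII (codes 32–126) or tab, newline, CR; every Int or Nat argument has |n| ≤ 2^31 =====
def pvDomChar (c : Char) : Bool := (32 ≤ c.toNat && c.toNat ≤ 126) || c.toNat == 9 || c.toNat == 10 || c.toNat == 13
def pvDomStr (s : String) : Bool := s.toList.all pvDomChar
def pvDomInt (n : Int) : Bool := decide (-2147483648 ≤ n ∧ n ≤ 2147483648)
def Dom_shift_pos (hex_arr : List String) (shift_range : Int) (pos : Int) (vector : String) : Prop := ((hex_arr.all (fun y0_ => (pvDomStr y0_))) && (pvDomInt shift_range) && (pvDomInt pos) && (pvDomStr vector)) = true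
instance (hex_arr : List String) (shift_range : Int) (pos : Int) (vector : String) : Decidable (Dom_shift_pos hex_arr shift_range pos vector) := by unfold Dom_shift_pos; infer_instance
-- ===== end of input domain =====

-- B replaces A's fused nested loop threading a 'hold' carry with a dict-selected order,
-- column-extract / rotate-by-one-slice / zip-splice decomposition ("alternative", same cost).

-- ===== PORT A =====
-- inner loop: for i in range(len(hex)): string += hex[i] or hold; threads hold
def pvInnerA (pos : Int) (hx : List Char) (hold : Char) : List Char × Char :=
  (PySem.List.enumerate hx 0).foldl
    (fun st p => if p.1 ≠ pos then (st.1 ++ [p.2], st.2) else (st.1 ++ [st.2], p.2))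
    ([], hold)

-- outer loop: for hex in arr: crypted_arr.append(string), threading hold
def pvOuterA (pos : Int) (arr : List (List Char)) (hold : Char) : List (List Char) × Char :=
  arr.foldl (fun st h => ((pvInnerA pos h st.2) |> fun r => (st.1 ++ [r.1], r.2))) ([], hold)

def shift_pos (hex_arr : List String) (shift_range : Int) (pos : Int) (vector : String) : List String :=
  if shift_range < 1 then []   -- Python returns None here (loop body never runs); excluded by Pre_
  else if vector = "right" then
    (pvOuterA pos (hex_arr.map String.toList)
      (((PySem.List.pyGet? hex_arr (-1)).bind (fun s => PySem.Str.pyGet? s pos)).getD ' ')).1.map String.ofList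
  else if vector = "left" then
    (pvOuterA pos ((hex_arr.map String.toList).reverse)
      (((PySem.List.pyGet? hex_arr 0).bind (fun s => PySem.Str.pyGet? s pos)).getD ' ')).1.map String.ofList
  else []

-- ===== PORT B =====
def shift_pos_alt (hex_arr : List String) (shift_range : Int) (pos : Int) (vector : String) : List String :=
  -- orders = {'right': hex_arr, 'left': hex_arr[::-1]}; arr = orders.get(vector, [])
  let orders : PySem.Dict String (List String) :=
    PySem.Dict.ofList [("right", hex_arr), ("left", hex_arr.reverse)]
  let arr := orders.getD vector []
  -- column = [h[pos] for h in arr]  (h[pos] in range on every Pre_ input)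
  let column := arr.map (fun h => (PySem.Str.pyGet? h pos).getD ' ')
  -- rotated = column[-1:] + column[:-1]
  let rotated := PySem.List.slice column (some (-1)) none ++ PySem.List.slice column none (some (-1))
  -- [h[:pos] + c + h[pos+1:] for h, c in zip(arr, rotated)]
  (arr.zip rotated).map (fun p =>
    String.ofList (PySem.List.slice p.1.toList none (some pos) ++ [p.2]
      ++ PySem.List.slice p.1.toList (some (pos + 1)) none))

-- ===== PRECONDITION & SPEC =====
-- Pre_ excludes inputs on which A returns no list (shift_range < 1 gives None; an empty
-- array or pos outside the anchor string's range raises IndexError) and, for vector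
-- 'right'/'left', negative pos and ragged arrays with a row shorter than pos: corners where
-- A's copy-through of the untouched rows is an artefact of comparing pos only with the
-- non-negative loop indices, and where B's column extraction raises IndexError.
def Pre_shift_pos (hex_arr : List String) (shift_range : Int) (pos : Int) (vector : String) : Prop :=
  1 ≤ shift_range ∧
  ((vector = "right" ∨ vector = "left") →
    hex_arr ≠ [] ∧ 0 ≤ pos ∧ ∀ h ∈ hex_arr, pos < (h.toList.length : Int))
instance (hex_arr : List String) (shift_range : Int) (pos : Int) (vector : String) : Decidable (Pre_shift_pos hex_arr shift_range pos vector) := by unfold Pre_shift_pos; infer_instance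

def pvWitness_shift_pos : List String × Int × Int × String := (["ab", "cd", "ef"], 1, 1, "right")

def Spec_shift_pos (hex_arr : List String) (shift_range : Int) (pos : Int) (vector : String) (out : List String) : Prop := out = shift_pos_alt hex_arr shift_range pos vector
instance (hex_arr : List String) (shift_range : Int) (pos : Int) (vector : String) (out : List String) : Decidable (Spec_shift_pos hex_arr shift_range pos vector out) := by unfold Spec_shift_pos; infer_instance

-- ===== CLAIM (what is proved, stated in full; the proofs are below) =====
def Claim_equal_shift_pos : Prop := ∀ (hex_arr : List String) (shift_range : Int) (pos : Int) (vector : String), Dom_shift_pos hex_arr shift_range pos vector → Pre_shift_pos hex_arr shift_range pos vector → Spec_shift_pos hex_arr shift_range pos vector (shift_pos hex_arr shift_range pos vector)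

-- ===== LEMMAS AND PROOFS =====

-- row substitution / column extraction at a known-in-range pos
def pvSpliceF (pos : Int) (p : List Char × Char) : List Char :=
  p.1.take pos.toNat ++ p.2 :: p.1.drop (pos.toNat + 1)
def pvColF (pos : Int) (h : List Char) : Char := (h[pos.toNat]?).getD ' '

-- A's inner loop after the index has passed pos copies the rest
theorem pv_inner_lt (pos : Int) (t : List Char) : ∀ (s : Int) (acc : List Char) (hold : Char), pos < s →
    (PySem.List.enumerate t s).foldl
      (fun st p => if p.1 ≠ pos then (st.1 ++ [p.2], st.2) else (st.1 ++ [st.2], p.2))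
      (acc, hold) = (acc ++ t, hold) := by
  induction t with
  | nil => intro s acc hold _; simp [PySem.List.enumerate]
  | cons c t ih =>
    intro s acc hold hlt
    rw [PySem.List.enumerate_cons]
    simp only [List.foldl_cons]
    rw [if_pos (by omega : (s, c).1 ≠ pos)]
    rw [ih (s + 1) (acc ++ [c]) hold (by omega)]
    simp

-- the substitution case: exactly one index matches pos
theorem pv_inner_in (pos : Int) (t : List Char) : ∀ (s : Int) (acc : List Char) (hold : Char),
    s ≤ pos → pos < s + t.length →
    (PySem.List.enumerate t s).foldl
      (fun st p => if p.1 ≠ pos then (st.1 ++ [p.2], st.2) else (st.1 ++ [st.2], p.2))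
      (acc, hold)
    = (acc ++ t.take (pos - s).toNat ++ hold :: t.drop ((pos - s).toNat + 1),
       (t[(pos - s).toNat]?).getD ' ') := by
  induction t with
  | nil => intro s acc hold h1 h2; simp at h2; omega
  | cons c t ih =>
    intro s acc hold h1 h2
    rw [PySem.List.enumerate_cons]
    simp only [List.foldl_cons]
    by_cases hs : s = pos
    · subst hs
      rw [if_neg (by simp : ¬ ((s, c).1 ≠ s))]
      rw [pv_inner_lt s t (s + 1) (acc ++ [hold]) c (by omega)]
      simp
    · rw [if_pos (by simpa using hs : (s, c).1 ≠ pos)]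
      rw [ih (s + 1) (acc ++ [c]) hold (by omega) (by simp at h2 ⊢; omega)]
      have hk : (pos - s).toNat = (pos - (s + 1)).toNat + 1 := by omega
      rw [hk]
      simp [List.take_succ_cons, List.drop_succ_cons]

-- characterization of A's inner loop on an in-range pos
theorem pvInnerA_eq (pos : Int) (h : List Char) (hold : Char)
    (h0 : 0 ≤ pos) (h1 : pos < (h.length : Int)) :
    pvInnerA pos h hold = (pvSpliceF pos (h, hold), pvColF pos h) := by
  unfold pvInnerA
  rw [pv_inner_in pos h 0 [] hold (by omega) (by omega)]
  simp [pvSpliceF, pvColF]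

-- A's outer loop, when every row is in range, is zip with the hold-prefixed column
theorem pv_outer_eq (pos : Int) (arr : List (List Char)) : ∀ (acc : List (List Char)) (hold : Char),
    (∀ h ∈ arr, 0 ≤ pos ∧ pos < (h.length : Int)) →
    (arr.foldl (fun st h => ((pvInnerA pos h st.2) |> fun r => (st.1 ++ [r.1], r.2))) (acc, hold)).1
      = acc ++ (arr.zip (hold :: arr.map (pvColF pos))).map (pvSpliceF pos) := by
  induction arr with
  | nil => intro acc hold _; simp
  | cons h t ih =>
    intro acc hold hq
    simp only [List.foldl_cons]
    rw [pvInnerA_eq pos h hold (hq h (by simp)).1 (hq h (by simp)).2]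
    simp only []
    rw [ih (acc ++ [pvSpliceF pos (h, hold)]) (pvColF pos h)
        (fun x hx => hq x (by simp [hx]))]
    simp [List.zip_cons_cons]

-- zip only reads the first (length of the left list) elements of the right list
theorem pv_zip_congr {α β : Type} (l : List α) : ∀ (cs cs' : List β),
    cs.take l.length = cs'.take l.length → l.zip cs = l.zip cs' := by
  induction l with
  | nil => intro cs cs' _; simp
  | cons x t ih =>
    intro cs cs' htake
    match cs, cs' with
    | [], [] => rfl
    | [], c' :: cs2' => simp at htake
    | c :: cs2, [] => simp at htake
    | c :: cs2, c' :: cs2' =>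
      simp only [List.length_cons, List.take_succ_cons, List.cons.injEq] at htake
      obtain ⟨rfl, htl⟩ := htake
      simp [List.zip_cons_cons, ih cs2 cs2' htl]

-- B's dict lookup resolved per vector
theorem pv_orders_eq (hex_arr : List String) (vector : String) :
    (PySem.Dict.ofList [("right", hex_arr), ("left", hex_arr.reverse)]).getD vector []
      = if vector = "right" then hex_arr else if vector = "left" then hex_arr.reverse else [] := by
  by_cases h1 : vector = "right"
  · subst h1
    simp [PySem.Dict.ofList, PySem.Dict.update, PySem.Dict.getD_eq_get?_getD,
          PySem.Dict.get?_insert]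
  · by_cases h2 : vector = "left"
    · subst h2
      simp [PySem.Dict.ofList, PySem.Dict.update, PySem.Dict.getD_eq_get?_getD,
            PySem.Dict.get?_insert]
    · simp [PySem.Dict.ofList, PySem.Dict.update, PySem.Dict.getD_eq_get?_getD,
            PySem.Dict.get?_insert, PySem.Dict.get?_empty, h1, h2]

-- B's per-row splice equals pvSpliceF, at a nonneg pos
theorem pv_spliceS_eq (pos : Int) (h0 : 0 ≤ pos) (p : String × Char) :
    String.ofList (PySem.List.slice p.1.toList none (some pos) ++ [p.2]
      ++ PySem.List.slice p.1.toList (some (pos + 1)) none)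
    = String.ofList (pvSpliceF pos (p.1.toList, p.2)) := by
  rw [PySem.List.slice_to _ h0, PySem.List.slice_from _ (by omega : (0:Int) ≤ pos + 1)]
  have h1 : (pos + 1).toNat = pos.toNat + 1 := by omega
  rw [h1]
  simp [pvSpliceF]

-- B's column entry equals pvColF on the character list, at a nonneg pos
theorem pv_colS_eq (pos : Int) (h0 : 0 ≤ pos) (s : String) :
    (PySem.Str.pyGet? s pos).getD ' ' = pvColF pos s.toList := by
  have : PySem.Str.pyGet? s pos = PySem.List.pyGet? s.toList pos := by
    simp [PySem.Str.pyGet?]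
  rw [this, PySem.List.pyGet?_of_nonneg _ h0, pvColF]

-- the main reduction, for an anchored (last-element) traversal order
theorem pv_main (pos : Int) (arrS : List String) (init : List String) (a : String)
    (harr : arrS = init ++ [a])
    (h0 : 0 ≤ pos) (hq : ∀ h ∈ arrS, pos < (h.toList.length : Int)) :
    (pvOuterA pos (arrS.map String.toList) (pvColF pos a.toList)).1.map String.ofList
    = (arrS.zip (PySem.List.slice (arrS.map (fun h => (PySem.Str.pyGet? h pos).getD ' ')) (some (-1)) none
         ++ PySem.List.slice (arrS.map (fun h => (PySem.Str.pyGet? h pos).getD ' ')) none (some (-1)))).map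
        (fun p => String.ofList (PySem.List.slice p.1.toList none (some pos) ++ [p.2]
           ++ PySem.List.slice p.1.toList (some (pos + 1)) none)) := by
  have hcol : arrS.map (fun h => (PySem.Str.pyGet? h pos).getD ' ')
      = arrS.map (fun h => pvColF pos h.toList) := by
    apply List.map_congr_left; intro s _; exact pv_colS_eq pos h0 s
  rw [hcol]
  unfold pvOuterA
  rw [pv_outer_eq pos (arrS.map String.toList) [] (pvColF pos a.toList)
      (by intro h hh; simp only [List.mem_map] at hh; obtain ⟨s, hs, rfl⟩ := hh
          exact ⟨h0, hq s hs⟩)]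
  rw [PySem.List.slice_from_neg_one, PySem.List.slice_to_neg_one]
  -- left side zip over char lists = zip over strings, mapped
  rw [List.nil_append, List.zip_map_left, List.map_map, List.map_map]
  have hfun : (fun p : String × Char => String.ofList (pvSpliceF pos (p.1.toList, p.2)))
      = fun p : String × Char => String.ofList (PySem.List.slice p.1.toList none (some pos) ++ [p.2]
           ++ PySem.List.slice p.1.toList (some (pos + 1)) none) := by
    funext p; exact (pv_spliceS_eq pos h0 p).symm
  have hcomp : (String.ofList ∘ pvSpliceF pos) ∘ Prod.map String.toList (id : Char → Char)
      = fun p : String × Char => String.ofList (pvSpliceF pos (p.1.toList, p.2)) := rfl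
  rw [hcomp, hfun]
  congr 1
  -- remaining: the two right-hand zip lists agree on the first arrS.length entries
  apply pv_zip_congr
  subst harr
  have hmapcons : ((init ++ [a]).map String.toList).map (fun h => pvColF pos h) =
      (init ++ [a]).map (fun h => pvColF pos h.toList) := by
    rw [List.map_map]; rfl
  rw [hmapcons]
  set ys := (init ++ [a]).map (fun h => pvColF pos h.toList) with hys
  have hlen : ys.length = init.length + 1 := by simp [hys]
  have hdrop : ys.drop (ys.length - 1) = [pvColF pos a.toList] := by
    have : ys = init.map (fun h => pvColF pos h.toList) ++ [pvColF pos a.toList] := by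
      simp [hys]
    rw [this]
    have h2 : (init.map (fun h => pvColF pos h.toList) ++ [pvColF pos a.toList]).length - 1
        = (init.map (fun h => pvColF pos h.toList)).length := by simp
    rw [h2, List.drop_left]
  rw [hdrop]
  have hlenarr : ((init ++ [a]).length) = ys.length := by simp [hys]
  rw [hlenarr]
  have hrot : ([pvColF pos a.toList] ++ ys.dropLast).length = ys.length := by
    simp [List.length_dropLast, hlen]
  rw [List.take_of_length_le (le_of_eq hrot), hlen, List.take_succ_cons,
      List.dropLast_eq_take, (by omega : ys.length - 1 = init.length)]
  simp

-- ===== VERDICT (by name: the statement is the Claim_ definition above) =====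
theorem shift_pos_spec : Claim_equal_shift_pos := by
  intro hex_arr shift_range pos vector _ hpre
  obtain ⟨hsr, hdir⟩ := hpre
  unfold Spec_shift_pos shift_pos shift_pos_alt
  simp only [pv_orders_eq]
  rw [if_neg (by omega : ¬ shift_range < 1)]
  by_cases hv : vector = "right"
  · rw [if_pos hv, if_pos hv]
    obtain ⟨hne, h0, hq⟩ := hdir (Or.inl hv)
    obtain hnil | ⟨init, lastS, rfl⟩ := hex_arr.eq_nil_or_concat
    · exact absurd hnil hne
    · simp only [List.concat_eq_append] at *
      have hhold : ((PySem.List.pyGet? (init ++ [lastS]) (-1)).bind (fun s => PySem.Str.pyGet? s pos)).getD ' '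
          = pvColF pos lastS.toList := by
        rw [PySem.List.pyGet?_neg_one, List.getLast?_concat]
        simp only [Option.bind_some]
        exact pv_colS_eq pos h0 lastS
      rw [hhold]
      exact pv_main pos (init ++ [lastS]) init lastS rfl h0 hq
  · rw [if_neg hv, if_neg hv]
    by_cases hv' : vector = "left"
    · rw [if_pos hv', if_pos hv']
      obtain ⟨hne, h0, hq⟩ := hdir (Or.inr hv')
      match hex_arr, hne with
      | b :: rest, _ =>
        have hrev : (b :: rest).reverse = rest.reverse ++ [b] := by simp
        have hmap : ((b :: rest).map String.toList).reverse
            = ((b :: rest).reverse).map String.toList := by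
          rw [List.map_reverse]
        have hhold : ((PySem.List.pyGet? (b :: rest) 0).bind (fun s => PySem.Str.pyGet? s pos)).getD ' '
            = pvColF pos b.toList := by
          rw [PySem.List.pyGet?_zero]
          simp only [List.getElem?_cons_zero, Option.bind_some]
          exact pv_colS_eq pos h0 b
        rw [hmap, hhold, hrev]
        exact pv_main pos (rest.reverse ++ [b]) rest.reverse b rfl h0
          (by intro h hh; exact hq h (by
                rcases List.mem_append.mp hh with h1 | h1
                · exact List.mem_cons_of_mem _ (List.mem_reverse.mp h1)
                · simp at h1; simp [h1]))
    · rw [if_neg hv', if_neg hv']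
      simp
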